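-- pv_equiv track=rewrite | github.com/yxk0070/cocos_cli | modules/script_binder.py | compress_uuid
-- ===== SOURCE A (Python) =====
-- BASE64_KEYS = "ABCDEFGHIJKLMNOPQRSTUVWXYZabcdefghijklmnopqrstuvwxyz0123456789+/"
--
-- def compress_uuid(uuid_str):
--     '''
--     Cocos Creator UUID 压缩算法 (2.x/3.x 兼容的 22位 base64)
--     '''
--     uuid_str = uuid_str.replace('-', '')
--     if len(uuid_str) != 32:
--         return uuid_str
--
--     head = uuid_str[:5]
--     tail = []
--     for i in range(5, 32, 3):
--         hex_val = int(uuid_str[i:i+3], 16)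
--         tail.append(BASE64_KEYS[hex_val >> 6])
--         tail.append(BASE64_KEYS[hex_val & 0x3F])
--
--     return head + ''.join(tail)
-- ===== SOURCE B (Python) =====
-- BASE64_KEYS = "ABCDEFGHIJKLMNOPQRSTUVWXYZabcdefghijklmnopqrstuvwxyz0123456789+/"
--
-- def compress_uuid(uuid_str):
--     uuid_str = uuid_str.replace('-', '')
--     if len(uuid_str) != 32:
--         return uuid_str
--     head = uuid_str[:5]
--     total = int(uuid_str[5:], 16)
--     tail = []
--     for k in range(17, -1, -1):
--         tail.append(BASE64_KEYS[total // 64 ** k % 64])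
--     return head + ''.join(tail)
-- ===== Notes on version B (the rewrite author's own statement) =====
-- stated objective: alternative
-- what changed: Instead of parsing nine 3-hex-digit chunks and emitting two base64 chars per chunk, B parses the whole 27-hex tail as one integer and extracts eighteen 6-bit groups most-significant first by div/mod.
import Mathlib
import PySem

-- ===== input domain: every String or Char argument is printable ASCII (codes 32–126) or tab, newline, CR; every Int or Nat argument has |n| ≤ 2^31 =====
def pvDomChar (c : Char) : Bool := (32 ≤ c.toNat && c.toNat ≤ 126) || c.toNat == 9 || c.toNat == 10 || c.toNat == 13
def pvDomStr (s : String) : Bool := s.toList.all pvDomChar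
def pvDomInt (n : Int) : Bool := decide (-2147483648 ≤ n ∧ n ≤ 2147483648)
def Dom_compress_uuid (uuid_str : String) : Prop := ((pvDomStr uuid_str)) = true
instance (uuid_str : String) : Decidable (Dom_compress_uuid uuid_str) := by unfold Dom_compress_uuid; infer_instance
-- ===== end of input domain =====

-- B parses the whole 27-hex tail as ONE integer and extracts eighteen 6-bit groups by div/mod,
-- instead of A's nine 3-hex-digit chunk parses emitting two chars each (alternative decomposition, same cost).

-- ===== PORT A =====
def BASE64_KEYS : List Char :=
  "ABCDEFGHIJKLMNOPQRSTUVWXYZabcdefghijklmnopqrstuvwxyz0123456789+/".toList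

def isHexChar (c : Char) : Bool :=
  ('0' ≤ c && c ≤ '9') || ('a' ≤ c && c ≤ 'f') || ('A' ≤ c && c ≤ 'F')

def hexDigitVal (c : Char) : Nat :=
  if '0' ≤ c && c ≤ '9' then c.toNat - 48
  else if 'a' ≤ c && c ≤ 'f' then c.toNat - 87
  else if 'A' ≤ c && c ≤ 'F' then c.toNat - 55
  else 0

-- hand port of int(s, 16): exact on nonempty strings of plain hex digits — the only shape Pre_ admits;
-- none elsewhere = ValueError (Python's sign/space/underscore extras are excluded by Pre_)
def hexVal? (cs : List Char) : Option Nat :=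
  if cs ≠ [] ∧ cs.all isHexChar = true then
    some (cs.foldl (fun a c => a * 16 + hexDigitVal c) 0)
  else none

def compress_uuid (uuid_str : String) : String :=
  let s := PySem.Str.replace uuid_str "-" ""
  if PySem.Str.len s ≠ 32 then s
  else
    let head := PySem.List.slice s.toList none (some 5)
    let tail := (PySem.List.pyRange 5 32 3).foldl (fun acc i =>
      let hexVal := (hexVal? (PySem.List.slice s.toList (some i) (some (i + 3)))).getD 0
      acc ++ [(PySem.List.pyGet? BASE64_KEYS ((hexVal >>> 6 : Nat) : Int)).getD ' ',
              (PySem.List.pyGet? BASE64_KEYS ((hexVal &&& 63 : Nat) : Int)).getD ' ']) []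
    String.ofList (head ++ tail)

-- ===== PORT B =====
def compress_uuid_alt (uuid_str : String) : String :=
  let s := PySem.Str.replace uuid_str "-" ""
  if PySem.Str.len s ≠ 32 then s
  else
    let head := PySem.List.slice s.toList none (some 5)
    let total := (hexVal? (PySem.List.slice s.toList (some 5) none)).getD 0
    let tail := (PySem.List.pyRange 17 (-1) (-1)).foldl (fun acc k =>
      acc ++ [(PySem.List.pyGet? BASE64_KEYS ((total / 64 ^ k.toNat % 64 : Nat) : Int)).getD ' ']) []
    String.ofList (head ++ tail)

-- ===== PRECONDITION & SPEC =====
-- Pre_ excludes inputs whose 27-char tail is not plain hex digits: on non-hex chunks A raises ValueError, and on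
-- chunks that only parse through int()'s lenient extras (underscore/sign/whitespace) A's chunk-local parse is an
-- accidental corner that a whole-tail parse legitimately reads differently.
def Pre_compress_uuid (uuid_str : String) : Prop :=
  (PySem.Str.replace uuid_str "-" "").toList.length ≠ 32 ∨
  ((PySem.Str.replace uuid_str "-" "").toList.drop 5).all isHexChar = true
instance (uuid_str : String) : Decidable (Pre_compress_uuid uuid_str) := by
  unfold Pre_compress_uuid; infer_instance

def pvWitness_compress_uuid : String := "960a2-e9d35f9dcf8d8-2fd388b1c0f96"

def Spec_compress_uuid (uuid_str : String) (out : String) : Prop := out = compress_uuid_alt uuid_str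
instance (uuid_str : String) (out : String) : Decidable (Spec_compress_uuid uuid_str out) := by
  unfold Spec_compress_uuid; infer_instance

-- ===== CLAIM (what is proved, stated in full; the proofs are below) =====
def Claim_equal_compress_uuid : Prop := ∀ (uuid_str : String), Dom_compress_uuid uuid_str → Pre_compress_uuid uuid_str → Spec_compress_uuid uuid_str (compress_uuid uuid_str)

-- ===== LEMMAS AND PROOFS =====
def hexNat (cs : List Char) : Nat := cs.foldl (fun a c => a * 16 + hexDigitVal c) 0

theorem hexDigitVal_lt (c : Char) : hexDigitVal c < 16 := by
  unfold hexDigitVal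
  split_ifs with h1 h2 h3
  · simp only [Bool.and_eq_true, decide_eq_true_eq] at h1
    have : c.toNat ≤ 57 := h1.2; omega
  · simp only [Bool.and_eq_true, decide_eq_true_eq] at h2
    have : c.toNat ≤ 102 := h2.2; omega
  · simp only [Bool.and_eq_true, decide_eq_true_eq] at h3
    have : c.toNat ≤ 70 := h3.2; omega
  · omega

theorem hexNat_foldl (cs : List Char) (a : Nat) :
    cs.foldl (fun a c => a * 16 + hexDigitVal c) a = a * 16 ^ cs.length + hexNat cs := by
  induction cs generalizing a with
  | nil => simp [hexNat]
  | cons c cs ih =>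
    have h2 : hexNat (c :: cs) = (0 * 16 + hexDigitVal c) * 16 ^ cs.length + hexNat cs := by
      rw [hexNat, List.foldl_cons, ih]
    rw [List.foldl_cons, ih, List.length_cons, h2]
    ring

theorem hexNat_append (xs ys : List Char) :
    hexNat (xs ++ ys) = hexNat xs * 16 ^ ys.length + hexNat ys := by
  simp only [hexNat, List.foldl_append]
  rw [hexNat_foldl ys (xs.foldl (fun a c => a * 16 + hexDigitVal c) 0)]
  rfl

theorem hexNat_lt (cs : List Char) : hexNat cs < 16 ^ cs.length := by
  induction cs with
  | nil => simp [hexNat]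
  | cons c cs ih =>
    have h := hexDigitVal_lt c
    have h2 : hexNat (c :: cs) = (0 * 16 + hexDigitVal c) * 16 ^ cs.length + hexNat cs := by
      rw [hexNat, List.foldl_cons, hexNat_foldl]
    rw [h2, List.length_cons, pow_succ]
    have hp : 0 < (16:Nat) ^ cs.length := pow_pos (by norm_num) _
    nlinarith [ih, h, hp]

theorem hexVal?_of (cs : List Char) (h1 : cs ≠ []) (h2 : cs.all isHexChar = true) :
    hexVal? cs = some (hexNat cs) := by
  simp [hexVal?, h1, h2, hexNat]

theorem pow16_64 (n : Nat) : (16 : Nat) ^ (3 * n) = 64 ^ (2 * n) := by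
  rw [pow_mul, pow_mul]; norm_num

theorem ex_div (p v r m : Nat) (hv : v < 4096) (hr : r < 64 ^ (2 * m)) :
    (p * 64 ^ (2 * m + 2) + v * 64 ^ (2 * m) + r) / 64 ^ (2 * m + 1) % 64 = v >>> 6 := by
  have hP : 0 < (64:Nat) ^ (2 * m) := Nat.pow_pos (by norm_num)
  have h1 : (p * 64 ^ (2 * m + 2) + v * 64 ^ (2 * m) + r) = r + (p * 4096 + v) * 64 ^ (2*m) := by
    rw [pow_succ, pow_succ]; ring
  have h2 : (64:Nat) ^ (2*m+1) = 64 ^ (2*m) * 64 := by rw [pow_succ]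
  rw [h1, h2, ← Nat.div_div_eq_div_mul, Nat.add_mul_div_right _ _ hP, Nat.div_eq_of_lt hr,
    Nat.shiftRight_eq_div_pow]
  show (0 + (p * 4096 + v)) / 64 % 64 = v / 2 ^ 6
  omega

theorem ex_mod (p v r m : Nat) (hr : r < 64 ^ (2 * m)) :
    (p * 64 ^ (2 * m + 2) + v * 64 ^ (2 * m) + r) / 64 ^ (2 * m) % 64 = v &&& 63 := by
  have hP : 0 < (64:Nat) ^ (2 * m) := Nat.pow_pos (by norm_num)
  have h1 : (p * 64 ^ (2 * m + 2) + v * 64 ^ (2 * m) + r) = r + (p * 4096 + v) * 64 ^ (2*m) := by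
    rw [pow_succ, pow_succ]; ring
  have h63 : v &&& 63 = v % 64 := by
    have := Nat.and_two_pow_sub_one_eq_mod v 6
    norm_num at this; exact this
  rw [h1, Nat.add_mul_div_right _ _ hP, Nat.div_eq_of_lt hr, h63]
  omega

theorem chunk_eq (t : List Char) (ht : t.length = 27) (j : Nat) (hj : j ≤ 8) :
    hexNat ((t.drop (3 * j)).take 3) >>> 6 = hexNat t / 64 ^ (2 * (8 - j) + 1) % 64 ∧
    hexNat ((t.drop (3 * j)).take 3) &&& 63 = hexNat t / 64 ^ (2 * (8 - j)) % 64 := by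
  set a := 3 * j with ha
  set m := 8 - j with hm
  have hsplit : t = t.take a ++ ((t.drop a).take 3 ++ t.drop (a + 3)) := by
    rw [show t.drop (a+3) = (t.drop a).drop 3 by rw [List.drop_drop],
      List.take_append_drop, List.take_append_drop]
  have hlc : ((t.drop a).take 3).length = 3 := by
    simp [List.length_take, List.length_drop, ht] <;> omega
  have hlr : (t.drop (a + 3)).length = 3 * m := by
    simp [List.length_drop, ht] <;> omega
  have hT : hexNat t = hexNat (t.take a) * 64 ^ (2 * m + 2)
      + hexNat ((t.drop a).take 3) * 64 ^ (2 * m) + hexNat (t.drop (a + 3)) := by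
    conv_lhs => rw [hsplit]
    rw [hexNat_append, hexNat_append, List.length_append, hlc, hlr]
    rw [show 3 + 3 * m = 3 * (m + 1) by ring, pow16_64, pow16_64,
      show 2 * (m + 1) = 2 * m + 2 by ring]
    ring
  have hv : hexNat ((t.drop a).take 3) < 4096 := by
    have := hexNat_lt ((t.drop a).take 3); rw [hlc] at this; norm_num at this; exact this
  have hr : hexNat (t.drop (a + 3)) < 64 ^ (2 * m) := by
    have := hexNat_lt (t.drop (a + 3)); rw [hlr, pow16_64] at this; exact this
  rw [hT]
  exact ⟨(ex_div _ _ _ _ hv hr).symm, (ex_mod _ _ _ _ hr).symm⟩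

theorem all_chunk (t : List Char) (hall : t.all isHexChar = true) (a : Nat) :
    ((t.drop a).take 3).all isHexChar = true := by
  rw [List.all_eq_true] at *
  intro x hx
  exact hall x (List.mem_of_mem_drop (List.mem_of_mem_take hx))


theorem chunk_eq_l (l : List Char) (hlen : l.length = 32) (j b e1 e2 : Nat)
    (hj : j ≤ 8) (hb : b = 5 + 3 * j) (he1 : e1 = 2 * (8 - j) + 1) (he2 : e2 = 2 * (8 - j)) :
    hexNat ((l.drop b).take 3) >>> 6 = hexNat (l.drop 5) / 64 ^ e1 % 64 ∧
    hexNat ((l.drop b).take 3) &&& 63 = hexNat (l.drop 5) / 64 ^ e2 % 64 := by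
  subst hb he1 he2
  have h27 : (l.drop 5).length = 27 := by simp [hlen]
  have hd : l.drop (5 + 3 * j) = (l.drop 5).drop (3 * j) := by rw [List.drop_drop]
  rw [hd]
  exact chunk_eq (l.drop 5) h27 j hj

-- ===== VERDICT (by name: the statement is the Claim_ definition above) =====
set_option maxHeartbeats 4000000 in
theorem compress_uuid_spec : Claim_equal_compress_uuid := by
  intro u _ hpre
  unfold Spec_compress_uuid compress_uuid compress_uuid_alt
  by_cases h : PySem.Str.len (PySem.Str.replace u "-" "") ≠ 32
  · simp only [if_pos h]
  · rw [if_neg h, if_neg h]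
    set l := (PySem.Str.replace u "-" "").toList with hldef
    have hlen : l.length = 32 := by
      have h32 : PySem.Str.len (PySem.Str.replace u "-" "") = 32 := not_not.mp h
      simp only [PySem.Str.len_eq, ← hldef] at h32
      exact_mod_cast h32
    have hall : (l.drop 5).all isHexChar = true := by
      rcases hpre with hp | hp
      · rw [← hldef] at hp; omega
      · rw [← hldef] at hp; exact hp
    have hr1 : PySem.List.pyRange 5 32 3 = [5,8,11,14,17,20,23,26,29] := by decide
    have hr2 : PySem.List.pyRange 17 (-1) (-1)
        = [17,16,15,14,13,12,11,10,9,8,7,6,5,4,3,2,1,0] := by decide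
    rw [hr1, hr2]
    simp only [List.foldl_cons, List.foldl_nil, List.nil_append, List.append_assoc]
    have s5 : PySem.List.slice l (some 5) (some (5 + 3)) = (l.drop 5).take 3 := by
      rw [PySem.List.slice_toNat _ (by norm_num) (by norm_num)]; simp
    have s8 : PySem.List.slice l (some 8) (some (8 + 3)) = (l.drop 8).take 3 := by
      rw [PySem.List.slice_toNat _ (by norm_num) (by norm_num)]; simp
    have s11 : PySem.List.slice l (some 11) (some (11 + 3)) = (l.drop 11).take 3 := by
      rw [PySem.List.slice_toNat _ (by norm_num) (by norm_num)]; simp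
    have s14 : PySem.List.slice l (some 14) (some (14 + 3)) = (l.drop 14).take 3 := by
      rw [PySem.List.slice_toNat _ (by norm_num) (by norm_num)]; simp
    have s17 : PySem.List.slice l (some 17) (some (17 + 3)) = (l.drop 17).take 3 := by
      rw [PySem.List.slice_toNat _ (by norm_num) (by norm_num)]; simp
    have s20 : PySem.List.slice l (some 20) (some (20 + 3)) = (l.drop 20).take 3 := by
      rw [PySem.List.slice_toNat _ (by norm_num) (by norm_num)]; simp
    have s23 : PySem.List.slice l (some 23) (some (23 + 3)) = (l.drop 23).take 3 := by
      rw [PySem.List.slice_toNat _ (by norm_num) (by norm_num)]; simp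
    have s26 : PySem.List.slice l (some 26) (some (26 + 3)) = (l.drop 26).take 3 := by
      rw [PySem.List.slice_toNat _ (by norm_num) (by norm_num)]; simp
    have s29 : PySem.List.slice l (some 29) (some (29 + 3)) = (l.drop 29).take 3 := by
      rw [PySem.List.slice_toNat _ (by norm_num) (by norm_num)]; simp
    have st : PySem.List.slice l (some 5) none = l.drop 5 := by
      rw [PySem.List.slice_from _ (by norm_num)]; simp
    rw [s5, s8, s11, s14, s17, s20, s23, s26, s29, st]
    simp only [Int.reduceToNat]
    have h27 : (l.drop 5).length = 27 := by simp [hlen]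
    have key : ∀ a : Nat, 5 ≤ a → a ≤ 29 → hexVal? ((l.drop a).take 3) = some (hexNat ((l.drop a).take 3)) := by
      intro a h5 h29
      apply hexVal?_of
      · have hlc : ((l.drop a).take 3).length = 3 := by
          simp only [List.length_take, List.length_drop, hlen]; omega
        intro hnil; rw [hnil] at hlc; simp at hlc
      · have hd : l.drop a = (l.drop 5).drop (a - 5) := by
          rw [List.drop_drop]; congr 1; omega
        rw [hd]; exact all_chunk _ hall _
    have htail : hexVal? (l.drop 5) = some (hexNat (l.drop 5)) := by
      apply hexVal?_of
      · intro hnil; rw [hnil] at h27; simp at h27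
      · exact hall
    rw [key 5 (by norm_num) (by norm_num), key 8 (by norm_num) (by norm_num),
        key 11 (by norm_num) (by norm_num), key 14 (by norm_num) (by norm_num),
        key 17 (by norm_num) (by norm_num), key 20 (by norm_num) (by norm_num),
        key 23 (by norm_num) (by norm_num), key 26 (by norm_num) (by norm_num),
        key 29 (by norm_num) (by norm_num), htail]
    simp only [Option.getD_some]
    have c0 := chunk_eq_l l hlen 0 5 17 16 (by norm_num) (by norm_num) (by norm_num) (by norm_num)
    have c1 := chunk_eq_l l hlen 1 8 15 14 (by norm_num) (by norm_num) (by norm_num) (by norm_num)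
    have c2 := chunk_eq_l l hlen 2 11 13 12 (by norm_num) (by norm_num) (by norm_num) (by norm_num)
    have c3 := chunk_eq_l l hlen 3 14 11 10 (by norm_num) (by norm_num) (by norm_num) (by norm_num)
    have c4 := chunk_eq_l l hlen 4 17 9 8 (by norm_num) (by norm_num) (by norm_num) (by norm_num)
    have c5 := chunk_eq_l l hlen 5 20 7 6 (by norm_num) (by norm_num) (by norm_num) (by norm_num)
    have c6 := chunk_eq_l l hlen 6 23 5 4 (by norm_num) (by norm_num) (by norm_num) (by norm_num)
    have c7 := chunk_eq_l l hlen 7 26 3 2 (by norm_num) (by norm_num) (by norm_num) (by norm_num)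
    have c8 := chunk_eq_l l hlen 8 29 1 0 (by norm_num) (by norm_num) (by norm_num) (by norm_num)
    rw [c0.1, c0.2, c1.1, c1.2, c2.1, c2.2, c3.1, c3.2, c4.1, c4.2, c5.1, c5.2, c6.1, c6.2, c7.1, c7.2, c8.1, c8.2]
    simp only [List.append_assoc, List.cons_append, List.nil_append]
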